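-- pv_equiv track=rewrite | github.com/donmccaughey/donm_cc | objective-c_tuesdays/page/formatted_page.py | join_unwrappable_words
-- ===== SOURCE A (Python) =====
-- from typing import List
--
-- def join_unwrappable_words(words: List[str]) -> List[str]:
--     first_word = words[0]
--     new_words = [first_word]
--     last_word = first_word
--     for word in words[1:]:
--         if not last_word[-1].isspace() and not word[0].isspace():
--             new_words.pop()
--             word = last_word + word
--         new_words.append(word)
--         last_word = word
--     return new_words
-- ===== SOURCE B (Python) =====
-- from typing import List
--
-- def join_unwrappable_words(words: List[str]) -> List[str]:
--     result = [words[-1]]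
--     for prev, word in zip(reversed(words[:-1]), reversed(words[1:])):
--         if not prev[-1].isspace() and not word[0].isspace():
--             result[0] = prev + result[0]
--         else:
--             result.insert(0, prev)
--     return result
-- ===== Notes on version B (the rewrite author's own statement) =====
-- stated objective: alternative
-- what changed: B makes a single right-to-left pass over the reversed zip of adjacent ORIGINAL word pairs, merging each joinable word into the front of the result, instead of A's left-to-right loop that pops the growing accumulated last word and re-appends its concatenation; B's pairwise test on the original neighbours is correct because under Pre_ the accumulated word always ends with the previous original word's last character.
import Mathlib
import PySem

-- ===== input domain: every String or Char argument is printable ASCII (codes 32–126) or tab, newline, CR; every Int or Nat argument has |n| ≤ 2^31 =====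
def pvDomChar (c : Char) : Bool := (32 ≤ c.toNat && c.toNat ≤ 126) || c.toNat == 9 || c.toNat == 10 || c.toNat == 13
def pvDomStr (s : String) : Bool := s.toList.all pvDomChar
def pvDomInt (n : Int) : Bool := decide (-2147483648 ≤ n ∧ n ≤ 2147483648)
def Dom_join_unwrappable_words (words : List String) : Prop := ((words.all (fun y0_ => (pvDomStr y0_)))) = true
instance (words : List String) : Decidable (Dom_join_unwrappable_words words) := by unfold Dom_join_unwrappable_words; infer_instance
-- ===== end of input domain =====

-- B replaces A's left-to-right pop-and-reconcatenate of a growing last word by one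
-- right-to-left pass over the reversed zip of adjacent ORIGINAL word pairs, merging
-- joinable words into the front of the result; objective: alternative decomposition.

-- ===== PORT A =====
-- loop body of A: state = (new_words, last_word); the character accesses last_word[-1] /
-- word[0] are totalized with default ' ' (Python raises IndexError there; Pre_ excludes it)
def pvStepA (st : List (List Char) × List Char) (word : List Char) :
    List (List Char) × List Char :=
  let new_words := st.1
  let last_word := st.2
  if !(PySem.Chars.isspace (PySem.List.pyGetD last_word (-1) ' ')) &&
     !(PySem.Chars.isspace (PySem.List.pyGetD word 0 ' ')) then
    -- new_words.pop(); word = last_word + word; append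
    (new_words.dropLast ++ [last_word ++ word], last_word ++ word)
  else
    (new_words ++ [word], word)

def join_unwrappable_words (words : List String) : List String :=
  match words.map String.toList with
  | [] => []  -- words[0] raises IndexError in Python; excluded by Pre_
  | first_word :: rest =>
    let st := rest.foldl pvStepA ([first_word], first_word)
    st.1.map String.ofList

-- ===== PORT B =====
-- loop body of B: pw = (prev, word), an adjacent ORIGINAL pair; result[0] is totalized
-- with pyGetD (result is never empty); prev[-1] / word[0] totalized as in A's port
def pvStepB (result : List (List Char)) (pw : List Char × List Char) :
    List (List Char) :=
  if !(PySem.Chars.isspace (PySem.List.pyGetD pw.1 (-1) ' ')) &&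
     !(PySem.Chars.isspace (PySem.List.pyGetD pw.2 0 ' ')) then
    (pw.1 ++ PySem.List.pyGetD result 0 []) :: result.drop 1  -- result[0] = prev + result[0]
  else
    pw.1 :: result                                            -- result.insert(0, prev)

def join_unwrappable_words_alt (words : List String) : List String :=
  match words.map String.toList with
  | [] => []  -- words[-1] raises IndexError in Python; excluded by Pre_
  | w :: rest =>
    let ws := w :: rest
    -- words[:-1] = ws.dropLast, words[1:] = ws.tail (exact for these slices)
    let pairs := (ws.dropLast.zip ws.tail).reverse
    (pairs.foldl pvStepB [ws.getLastD []]).map String.ofList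

-- ===== PRECONDITION & SPEC =====
-- Pre_ excludes exactly the inputs where Python A raises IndexError: the empty list
-- (words[0]) and lists where some word is empty at a position where a character of it
-- is read (last_word[-1], or word[0] after a word ending in non-whitespace).
def Pre_join_unwrappable_words (words : List String) : Prop :=
  words ≠ [] ∧ List.IsChain
    (fun p w => p.toList ≠ [] ∧
      (PySem.Chars.isspace (p.toList.getLastD ' ') = false → w.toList ≠ [])) words
instance (words : List String) : Decidable (Pre_join_unwrappable_words words) := by
  unfold Pre_join_unwrappable_words; infer_instance

def pvWitness_join_unwrappable_words : List String := ["ab", "cd ", "ef"]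

def Spec_join_unwrappable_words (words : List String) (out : List String) : Prop := out = join_unwrappable_words_alt words
instance (words : List String) (out : List String) : Decidable (Spec_join_unwrappable_words words out) := by unfold Spec_join_unwrappable_words; infer_instance

-- ===== CLAIM (what is proved, stated in full; the proofs are below) =====
def Claim_equal_join_unwrappable_words : Prop := ∀ (words : List String), Dom_join_unwrappable_words words → Pre_join_unwrappable_words words → Spec_join_unwrappable_words words (join_unwrappable_words words)

-- ===== LEMMAS AND PROOFS =====

-- B's loop, rephrased as structural recursion on the word list (the reversed-zip foldl
-- computes exactly this, see pvGB_eq_fold)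
def pvGB : List (List Char) → List (List Char)
  | [] => []
  | [x] => [x]
  | x :: y :: rs => pvStepB (pvGB (y :: rs)) (x, y)

lemma pvGB_eq_fold :
    ∀ (x : List Char) (rs : List (List Char)),
      (((x :: rs).dropLast.zip (x :: rs).tail).reverse).foldl pvStepB
          [(x :: rs).getLastD []] = pvGB (x :: rs) := by
  intro x rs
  induction rs generalizing x with
  | nil => rfl
  | cons y rs ih =>
    have h1 : (x :: y :: rs).dropLast = x :: (y :: rs).dropLast := by
      simp [List.dropLast_cons_of_ne_nil]
    have h2 : ((x :: y :: rs).dropLast.zip (x :: y :: rs).tail)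
        = (x, y) :: ((y :: rs).dropLast.zip (y :: rs).tail) := by
      cases rs <;> simp [h1]
    rw [h2, List.foldl_reverse, List.foldr_cons, ← List.foldl_reverse]
    have h3 : (x :: y :: rs).getLastD [] = (y :: rs).getLastD [] := by
      simp
    rw [h3, ih y]
    rfl

lemma pvGB_cons_ne_nil (x : List Char) (rs : List (List Char)) :
    pvGB (x :: rs) ≠ [] := by
  cases rs with
  | nil => simp [pvGB]
  | cons y rs =>
    simp only [pvGB, pvStepB]
    split_ifs <;> simp

lemma pvGetD_neg_one_append {xs ys : List Char} (hy : ys ≠ []) :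
    PySem.List.pyGetD (xs ++ ys) (-1) ' ' = PySem.List.pyGetD ys (-1) ' ' := by
  simp [PySem.List.pyGetD_neg_one, hy, List.getLast_append_of_ne_nil]

-- prepending chars to the first word only changes the head of B's recursion
lemma pvGB_head (w v : List Char) (hv : v ≠ []) :
    ∀ rs, ∃ h t, pvGB (v :: rs) = h :: t ∧ pvGB ((w ++ v) :: rs) = (w ++ h) :: t := by
  intro rs
  cases rs with
  | nil => exact ⟨v, [], rfl, rfl⟩
  | cons u rs =>
    obtain ⟨h', t', hT⟩ : ∃ h' t', pvGB (u :: rs) = h' :: t' := by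
      cases hT : pvGB (u :: rs) with
      | nil => exact absurd hT (pvGB_cons_ne_nil u rs)
      | cons a b => exact ⟨a, b, rfl⟩
    have hc : PySem.List.pyGetD (w ++ v) (-1) ' ' = PySem.List.pyGetD v (-1) ' ' :=
      pvGetD_neg_one_append hv
    simp only [pvGB, pvStepB, hT, hc]
    split_ifs with hcond
    · exact ⟨v ++ h', t', by simp [PySem.List.pyGetD_zero_cons], by
        simp [PySem.List.pyGetD_zero_cons, List.append_assoc]⟩
    · exact ⟨v, h' :: t', rfl, rfl⟩

-- A's loop never touches the words before the last one: frame lemma for the prefix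
lemma pvFoldA_frame :
    ∀ (rs : List (List Char)) (pre : List (List Char)) (x : List Char),
      rs.foldl pvStepA (pre ++ [x], x)
        = (pre ++ (rs.foldl pvStepA ([x], x)).1, (rs.foldl pvStepA ([x], x)).2) := by
  intro rs
  induction rs with
  | nil => intro pre x; rfl
  | cons v rs ih =>
    intro pre x
    simp only [List.foldl_cons, pvStepA]
    split_ifs with hc
    · have e1 : (pre ++ [x]).dropLast ++ [x ++ v] = pre ++ [x ++ v] := by simp
      have e2 : ([x] : List (List Char)).dropLast ++ [x ++ v] = [x ++ v] := by simp
      rw [e1, e2]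
      have := ih pre (x ++ v)
      simpa using this
    · have e3 : pre ++ [x] ++ [v] = (pre ++ [x]) ++ [v] := by simp
      rw [e3, ih (pre ++ [x]) v, ih [x] v]
      simp

-- main invariant: A's accumulated word list equals B's recursion
lemma pvFoldA_eq_pvGB :
    ∀ (rs : List (List Char)) (w : List Char),
      (rs.foldl pvStepA ([w], w)).1 = pvGB (w :: rs) := by
  intro rs
  induction rs with
  | nil => intro w; rfl
  | cons v rs ih =>
    intro w
    simp only [List.foldl_cons, pvStepA]
    split_ifs with hc
    · -- joinable: v must be nonempty (else word[0] defaults to ' ', whitespace)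
      have hv : v ≠ [] := by
        intro hveq; subst hveq
        rw [Bool.and_eq_true] at hc
        have : PySem.Chars.isspace (PySem.List.pyGetD ([] : List Char) 0 ' ') = true := by
          decide
        simp [this] at hc
      have e : ([w] : List (List Char)).dropLast ++ [w ++ v] = [w ++ v] := by simp
      rw [e, ih (w ++ v)]
      obtain ⟨h, t, hB, hAB⟩ := pvGB_head w v hv rs
      simp only [pvGB, pvStepB, hB, hc, if_pos, hAB]
      have hcond : (!(PySem.Chars.isspace (PySem.List.pyGetD w (-1) ' ')) &&
          !(PySem.Chars.isspace (PySem.List.pyGetD v 0 ' '))) = true := hc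
      simp [PySem.List.pyGetD_zero_cons]
    · have e : ([w] : List (List Char)) ++ [v] = [w] ++ [v] := rfl
      rw [show (([w] ++ [v] : List (List Char)), v) = ([w] ++ [v], v) from rfl,
        pvFoldA_frame rs [w] v, ih v]
      simp only [pvGB, pvStepB]
      have hcond : (!(PySem.Chars.isspace (PySem.List.pyGetD w (-1) ' ')) &&
          !(PySem.Chars.isspace (PySem.List.pyGetD v 0 ' '))) = false := by
        simpa using hc
      simp [hcond]

-- ===== VERDICT =====
theorem join_unwrappable_words_spec : Claim_equal_join_unwrappable_words := by
  intro words _ _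
  unfold Spec_join_unwrappable_words
  cases hws : words.map String.toList with
  | nil => simp [join_unwrappable_words, join_unwrappable_words_alt, hws]
  | cons w rest =>
    simp only [join_unwrappable_words, join_unwrappable_words_alt, hws]
    rw [pvFoldA_eq_pvGB rest w, pvGB_eq_fold w rest]
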